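-- pv_equiv track=rewrite | github.com/Interrobang01/openrecall | openrecall/app.py | _parse_embedding_expression
-- ===== SOURCE A (Python) =====
-- from typing import Dict, List, Optional, Tuple
--
-- def _contains_unquoted_parentheses(raw_query: str) -> bool:
--     """Returns whether raw query contains unquoted parentheses."""
--     in_quotes = False
--     escape = False
--     for char in raw_query:
--       if escape:
--         escape = False
--         continue
--       if char == "\\":
--         escape = True
--         continue
--       if char == '"':
--         in_quotes = not in_quotes
--         continue
--       if not in_quotes and char in "()":
--         return True
--     return False
--
-- def _parse_embedding_expression(raw_query: str) -> Optional[List[Tuple[str, int]]]: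
--     """Parses expressions like '(queen) - (king) + (woman)' into weighted terms."""
--     if not _contains_unquoted_parentheses(raw_query):
--       return None
--
--     expression = raw_query.strip()
--     if not expression:
--       return None
--
--     terms: List[Tuple[str, int]] = []
--     index = 0
--     next_sign = 1
--
--     while index < len(expression):
--       while index < len(expression) and expression[index].isspace():
--         index += 1
--
--       if index >= len(expression):
--         break
--
--       if expression[index] != "(":
--         return None
--
--       index += 1
--       start_index = index
--       has_nested_parenthesis = False
--       while index < len(expression) and expression[index] != ")":
--         if expression[index] == "(":
--           has_nested_parenthesis = True
--         index += 1
--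
--       if index >= len(expression) or has_nested_parenthesis:
--         return None
--
--       term_text = expression[start_index:index].strip()
--       if not term_text:
--         return None
--
--       terms.append((term_text, next_sign))
--       index += 1
--
--       while index < len(expression) and expression[index].isspace():
--         index += 1
--
--       if index >= len(expression):
--         break
--
--       operator = expression[index]
--       if operator == "+":
--         next_sign = 1
--       elif operator == "-":
--         next_sign = -1
--       else:
--         return None
--       index += 1
--
--     return terms if terms else None
-- ===== SOURCE B (Python) =====
-- from typing import Dict, List, Optional, Tuple
--
-- def _contains_unquoted_parentheses(raw_query: str) -> bool:
--     """Returns whether raw query contains unquoted parentheses."""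
--     in_quotes = False
--     escape = False
--     for char in raw_query:
--       if escape:
--         escape = False
--         continue
--       if char == "\\":
--         escape = True
--         continue
--       if char == '"':
--         in_quotes = not in_quotes
--         continue
--       if not in_quotes and char in "()":
--         return True
--     return False
--
-- def _parse_chunk(chunk: str, is_first: bool) -> Optional[Tuple[str, int]]:
--     """A chunk is the text between two ')' separators: [operator] '(' term-text."""
--     before, sep, inner = chunk.partition("(")
--     if not sep:
--         return None
--     if is_first:
--         if before:
--             return None
--         sign = 1
--     else:
--         prefix = before.strip()
--         if prefix == "+":
--             sign = 1
--         elif prefix == "-":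
--             sign = -1
--         else:
--             return None
--     if "(" in inner:
--         return None
--     text = inner.strip()
--     if not text:
--         return None
--     return (text, sign)
--
-- def _parse_embedding_expression(raw_query: str) -> Optional[List[Tuple[str, int]]]:
--     """Parses expressions like '(queen) - (king) + (woman)' into weighted terms."""
--     if not _contains_unquoted_parentheses(raw_query):
--         return None
--
--     expression = raw_query.strip()
--     if not expression:
--         return None
--
--     chunks = expression.split(")")
--     tail = chunks[-1]
--     if tail.strip() not in ("", "+", "-"):
--         return None
--
--     body = chunks[:-1]
--     if not body:
--         return None
--
--     terms: List[Tuple[str, int]] = []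
--     for i, chunk in enumerate(body):
--         item = _parse_chunk(chunk, i == 0)
--         if item is None:
--             return None
--         terms.append(item)
--     return terms
-- ===== Notes on version B (the rewrite author's own statement) =====
-- stated objective: alternative
-- what changed: A's single-cursor while-loop state machine is replaced by splitting the stripped expression on ')' once and validating each resulting chunk ('[operator] ( text') independently with str.partition/strip, with the tail after the last ')' checked up front.
import Mathlib
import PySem

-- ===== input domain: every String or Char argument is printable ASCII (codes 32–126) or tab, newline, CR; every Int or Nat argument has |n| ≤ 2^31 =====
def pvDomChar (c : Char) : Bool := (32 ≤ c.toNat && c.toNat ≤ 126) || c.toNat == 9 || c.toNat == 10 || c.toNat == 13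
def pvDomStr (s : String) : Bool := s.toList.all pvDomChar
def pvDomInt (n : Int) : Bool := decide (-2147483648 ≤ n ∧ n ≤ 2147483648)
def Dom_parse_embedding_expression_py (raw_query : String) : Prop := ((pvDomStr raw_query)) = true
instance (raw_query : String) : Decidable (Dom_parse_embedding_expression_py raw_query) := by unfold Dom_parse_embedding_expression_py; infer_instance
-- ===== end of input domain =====

-- B re-implements A's single-cursor state machine as: split the expression on ')' once,
-- then validate each chunk ("[operator] ( text") independently (objective: alternative decomposition).

-- ===== PORT A =====

-- helper _contains_unquoted_parentheses: the for-loop with (in_quotes, escape) state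
def pvCUQ : List Char → Bool → Bool → Bool
  | [], _, _ => false
  | c :: rest, inq, esc =>
    if esc then pvCUQ rest inq false
    else if c = '\\' then pvCUQ rest inq true
    else if c = '"' then pvCUQ rest (!inq) false
    else if !inq && (c = '(' || c = ')') then true
    else pvCUQ rest inq esc

def pvContainsUnquotedParens (s : List Char) : Bool := pvCUQ s false false

-- one iteration's term part of A's while loop: skip whitespace; end-of-string is a loop break
-- (brk), a non-'(' char / missing ')' / nested '(' / empty term is a `return None` (err),
-- otherwise the term and the rest after the closing ')'.
inductive PvTRes where
  | err : PvTRes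
  | brk : PvTRes
  | ok : List Char → String → Int → PvTRes

def pvTerm (cs : List Char) (sign : Int) : PvTRes :=
  match cs.dropWhile PySem.Chars.isspace with
  | [] => .brk
  | c :: rest =>
    if c ≠ '(' then .err
    else
      -- scan to the first ')', recording nested '(' (Python's inner while with has_nested flag)
      let body := rest.takeWhile (fun d => d ≠ ')')
      match rest.dropWhile (fun d => d ≠ ')') with
      | [] => .err
      | _ :: rest' =>
        if body.contains '(' then .err
        else
          let text := PySem.Chars.strip body
          if text = [] then .err
          else .ok rest' (String.ofList text) sign

theorem pvTerm_ok_length {cs : List Char} {sign : Int} {rest' : List Char} {t : String} {s : Int}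
    (h : pvTerm cs sign = .ok rest' t s) : rest'.length < cs.length := by
  unfold pvTerm at h
  cases hd : cs.dropWhile PySem.Chars.isspace with
  | nil => rw [hd] at h; exact absurd h (by simp)
  | cons c rest =>
    rw [hd] at h
    have h1 : (c :: rest).length ≤ cs.length := hd ▸ List.length_dropWhile_le _ _
    by_cases hc : c = '('
    · simp only [hc, ne_eq, not_true_eq_false, if_false] at h
      cases hd2 : rest.dropWhile (fun d => d ≠ ')') with
      | nil => rw [hd2] at h; exact absurd h (by simp)
      | cons x rest2 =>
        rw [hd2] at h
        have h2 : (x :: rest2).length ≤ rest.length := hd2 ▸ List.length_dropWhile_le _ _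
        split_ifs at h with h3 h4
        · simp only [PvTRes.ok.injEq] at h
          obtain ⟨rfl, -, -⟩ := h
          simp at h1 h2; omega
    · simp [hc] at h

-- the rest of A's while loop, entered right after a term's closing ')': skip whitespace,
-- break at end, read an operator, then the next term part; loops.
def pvLoop (cs : List Char) (terms : List (String × Int)) : Option (List (String × Int)) :=
  match hd : cs.dropWhile PySem.Chars.isspace with
  | [] => if terms = [] then none else some terms
  | c :: rest =>
    match (if c = '+' then some (1 : Int) else if c = '-' then some (-1 : Int) else none) with
    | none => none
    | some sg =>
      match hp : pvTerm rest sg with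
      | .err => none
      | .brk => if terms = [] then none else some terms
      | .ok rest' txt sgn => pvLoop rest' (terms ++ [(txt, sgn)])
termination_by cs.length
decreasing_by
  have h1 : (c :: rest).length ≤ cs.length := hd ▸ List.length_dropWhile_le _ _
  have h2 := pvTerm_ok_length hp
  simp at h1; omega

def parse_embedding_expression_py (raw_query : String) : Option (List (String × Int)) :=
  if !pvContainsUnquotedParens raw_query.toList then none
  else
    let expression := PySem.Chars.strip raw_query.toList
    if expression = [] then none
    else
      match pvTerm expression 1 with
      | .err => none
      | .brk => none        -- loop broke with terms = []: Python's final `return terms if terms else None`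
      | .ok rest txt sg => pvLoop rest [(txt, sg)]

-- ===== PORT B =====

-- chunk.partition("(") for the one-char separator, ported by hand (exact: before = chars
-- before the first '(', found iff the dropWhile part is nonempty); '"(" in inner' is
-- membership of the single char (exact for a one-char needle).
def pvParseChunk (chunk : List Char) (isFirst : Bool) : Option (String × Int) :=
  match chunk.dropWhile (fun c => c ≠ '(') with
  | [] => none
  | _ :: inner =>
    let before := chunk.takeWhile (fun c => c ≠ '(')
    match (if isFirst then (if before ≠ [] then none else some (1 : Int))
           else
             (let pre := PySem.Chars.strip before
              if pre = ['+'] then some (1 : Int)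
              else if pre = ['-'] then some (-1 : Int)
              else none)) with
    | none => none
    | some sign =>
      if inner.contains '(' then none
      else
        let text := PySem.Chars.strip inner
        if text = [] then none
        else some (String.ofList text, sign)

def pvChunksLoop : List (List Char) → Bool → List (String × Int) → Option (List (String × Int))
  | [], _, terms => some terms
  | ch :: rest, first, terms =>
    match pvParseChunk ch first with
    | none => none
    | some t => pvChunksLoop rest false (terms ++ [t])

def parse_embedding_expression_py_alt (raw_query : String) : Option (List (String × Int)) :=
  if !pvContainsUnquotedParens raw_query.toList then none
  else
    let expression := PySem.Chars.strip raw_query.toList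
    if expression = [] then none
    else
      -- expression.split(")") ported as the library's List.splitOn (same semantics for a
      -- one-char separator, empty pieces kept); chunks[-1] via getLastD (splitOn is never empty)
      let chunks := expression.splitOn ')'
      let tail := chunks.getLastD []
      if ¬ (PySem.Chars.strip tail = [] ∨ PySem.Chars.strip tail = ['+'] ∨ PySem.Chars.strip tail = ['-']) then none
      else
        let body := chunks.dropLast
        if body = [] then none
        else pvChunksLoop body true []

-- ===== PRECONDITION & SPEC =====
def Spec_parse_embedding_expression_py (raw_query : String) (out : Option (List (String × Int))) : Prop := out = parse_embedding_expression_py_alt raw_query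
instance (raw_query : String) (out : Option (List (String × Int))) : Decidable (Spec_parse_embedding_expression_py raw_query out) := by unfold Spec_parse_embedding_expression_py; infer_instance

-- ===== CLAIM (what is proved, stated in full; the proofs are below) =====
def Claim_equal_parse_embedding_expression_py : Prop := ∀ (raw_query : String), Dom_parse_embedding_expression_py raw_query → Spec_parse_embedding_expression_py raw_query (parse_embedding_expression_py raw_query)

-- ===== LEMMAS AND PROOFS =====

-- whitespace / takeWhile / dropWhile facts specific to the two ports' scans

theorem pv_dw_sp_append (w l : List Char) (hw : ∀ c ∈ w, PySem.Chars.isspace c = true) :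
    (w ++ l).dropWhile PySem.Chars.isspace = l.dropWhile PySem.Chars.isspace := by
  induction w with
  | nil => rfl
  | cons c r ih =>
    simp only [List.cons_append, List.dropWhile_cons, hw c (by simp), if_true]
    exact ih (fun d hd => hw d (by simp [hd]))

theorem pv_dw_cons_ns (c : Char) (l : List Char) (hc : PySem.Chars.isspace c = false) :
    (c :: l).dropWhile PySem.Chars.isspace = c :: l := by
  simp [hc]

theorem pv_tw_split (x : Char) (u v : List Char) (hu : x ∉ u) :
    (u ++ x :: v).takeWhile (fun c => c ≠ x) = u := by
  induction u with
  | nil => simp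
  | cons c r ih =>
    have hc : c ≠ x := by intro h; subst h; exact hu (List.mem_cons_self ..)
    rw [List.cons_append, List.takeWhile_cons, if_pos (by simp [hc]),
      ih (fun h => hu (List.mem_cons_of_mem _ h))]

theorem pv_dw_split (x : Char) (u v : List Char) (hu : x ∉ u) :
    (u ++ x :: v).dropWhile (fun c => c ≠ x) = x :: v := by
  induction u with
  | nil => simp
  | cons c r ih =>
    have hc : c ≠ x := by intro h; subst h; exact hu (List.mem_cons_self ..)
    rw [List.cons_append, List.dropWhile_cons, if_pos (by simp [hc]),
      ih (fun h => hu (List.mem_cons_of_mem _ h))]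

theorem pv_dw_np (x : Char) (u : List Char) (hu : x ∉ u) :
    u.dropWhile (fun c => c ≠ x) = [] := by
  rw [List.dropWhile_eq_nil_iff]
  intro c hc
  simp only [decide_eq_true_eq]
  intro h; subst h; exact hu hc

theorem pv_tw_pass (x : Char) (w l : List Char) (hw : x ∉ w) :
    (w ++ l).takeWhile (fun c => c ≠ x) = w ++ l.takeWhile (fun c => c ≠ x) := by
  induction w with
  | nil => rfl
  | cons c r ih =>
    have hc : c ≠ x := by intro h; subst h; exact hw (List.mem_cons_self ..)
    rw [List.cons_append, List.takeWhile_cons, if_pos (by simp [hc]),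
      ih (fun h => hw (List.mem_cons_of_mem _ h)), List.cons_append]

theorem pv_tw_cons_ne (x c : Char) (l : List Char) (hc : c ≠ x) :
    (c :: l).takeWhile (fun a => a ≠ x) = c :: l.takeWhile (fun a => a ≠ x) := by
  rw [List.takeWhile_cons, if_pos (by simp [hc])]

theorem pv_tw_cons_eq (x : Char) (l : List Char) :
    (x :: l).takeWhile (fun a => a ≠ x) = [] := by
  rw [List.takeWhile_cons, if_neg (by simp)]

theorem pv_ns_head (c : Char) (r : List Char)
    (h : (c :: r).dropWhile PySem.Chars.isspace = c :: r) : PySem.Chars.isspace c = false := by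
  by_cases hc : PySem.Chars.isspace c = true
  · rw [List.dropWhile_cons, if_pos hc] at h
    have := List.length_dropWhile_le PySem.Chars.isspace r
    have := congrArg List.length h
    simp at this; omega
  · simpa using hc

theorem pv_sp_not_mem {l : List Char} (hall : ∀ c ∈ l, PySem.Chars.isspace c = true)
    {x : Char} (hx : PySem.Chars.isspace x = false) : x ∉ l :=
  fun h => by rw [hall x h] at hx; cases hx

-- strip facts (PySem.Chars.strip = rstrip ∘ lstrip, both dropWhile-based)

theorem pv_rstrip_cons (c : Char) (r : List Char) (hc : PySem.Chars.isspace c = false) :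
    PySem.Chars.rstrip (c :: r) = c :: PySem.Chars.rstrip r := by
  unfold PySem.Chars.rstrip
  rw [show (c :: r).reverse = r.reverse ++ [c] by simp, List.dropWhile_append]
  split_ifs with h
  · simp only [List.isEmpty_iff] at h
    simp [h, hc]
  · simp

theorem pv_rstrip_all_sp (r : List Char) (hr : ∀ c ∈ r, PySem.Chars.isspace c = true) :
    PySem.Chars.rstrip r = [] := by
  unfold PySem.Chars.rstrip
  simp [List.dropWhile_eq_nil_iff]
  intro c hc
  exact hr c (by simpa using hc)

theorem pv_rstrip_ne_nil (r : List Char) (d : Char) (hd : d ∈ r)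
    (hns : PySem.Chars.isspace d = false) : PySem.Chars.rstrip r ≠ [] := by
  unfold PySem.Chars.rstrip
  simp [List.dropWhile_eq_nil_iff]
  exact ⟨d, by simpa using hd, by simp [hns]⟩

theorem pv_strip_all_sp (l : List Char) (hl : ∀ c ∈ l, PySem.Chars.isspace c = true) :
    PySem.Chars.strip l = [] := by
  unfold PySem.Chars.strip PySem.Chars.lstrip
  rw [List.dropWhile_eq_nil_iff.mpr hl]
  rfl

theorem pv_strip_sp_append (w l : List Char) (hw : ∀ c ∈ w, PySem.Chars.isspace c = true) :
    PySem.Chars.strip (w ++ l) = PySem.Chars.strip l := by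
  unfold PySem.Chars.strip PySem.Chars.lstrip
  rw [pv_dw_sp_append w l hw]

theorem pv_strip_cons_ns (c : Char) (r : List Char) (hc : PySem.Chars.isspace c = false) :
    PySem.Chars.strip (c :: r) = c :: PySem.Chars.rstrip r := by
  unfold PySem.Chars.strip PySem.Chars.lstrip
  rw [pv_dw_cons_ns c r hc, pv_rstrip_cons c r hc]

theorem pv_strip_fix (l : List Char) :
    (PySem.Chars.strip l).dropWhile PySem.Chars.isspace = PySem.Chars.strip l := by
  unfold PySem.Chars.strip PySem.Chars.lstrip
  cases hd : l.dropWhile PySem.Chars.isspace with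
  | nil => rfl
  | cons c r =>
    have hc : PySem.Chars.isspace c = false := by
      have h1 := List.head_dropWhile_not PySem.Chars.isspace (l := l) (by rw [hd]; simp)
      simpa [hd] using h1
    rw [pv_rstrip_cons c r hc]
    exact pv_dw_cons_ns _ _ hc

-- decomposing a list at its first occurrence of a character

theorem pv_first_occ (x : Char) (l : List Char) (hx : x ∈ l) :
    ∃ u v, l = u ++ x :: v ∧ x ∉ u := by
  induction l with
  | nil => cases hx
  | cons c r ih =>
    by_cases hc : c = x
    · exact ⟨[], r, by simp [hc], by simp⟩
    · have hxr : x ∈ r := by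
        rcases List.mem_cons.mp hx with h | h
        · exact absurd h.symm hc
        · exact h
      obtain ⟨u, v, rfl, hu⟩ := ih hxr
      refine ⟨c :: u, v, by simp, ?_⟩
      intro hmem
      rcases List.mem_cons.mp hmem with h | h
      · exact hc h.symm
      · exact hu h

-- List.splitOn on the first separator (separator absent / present)

theorem pv_splitOn_no (u : List Char) (hu : ')' ∉ u) : u.splitOn ')' = [u] := by
  induction u with
  | nil => rfl
  | cons c r ih =>
    have hc : c ≠ ')' := fun h => hu (h ▸ List.mem_cons_self ..)
    have hr := ih (fun h => hu (List.mem_cons_of_mem _ h))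
    simp only [List.splitOn, List.splitOnP_cons] at *
    simp [hc, hr]

theorem pv_splitOn_first (u v : List Char) (hu : ')' ∉ u) :
    (u ++ ')' :: v).splitOn ')' = u :: v.splitOn ')' := by
  induction u with
  | nil => simp [List.splitOn, List.splitOnP_cons]
  | cons c r ih =>
    have hc : c ≠ ')' := fun h => hu (h ▸ List.mem_cons_self ..)
    have hr := ih (fun h => hu (List.mem_cons_of_mem _ h))
    simp only [List.splitOn, List.splitOnP_cons, List.cons_append] at *
    simp [hc, hr]

theorem pv_splitOn_ne_nil (l : List Char) : l.splitOn ')' ≠ [] :=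
  List.splitOnP_ne_nil _ l

-- one-step reduction lemmas for the ports' recursions, given the scan discriminant

theorem pvLoop_nil (cs : List Char) (terms : List (String × Int))
    (h : cs.dropWhile PySem.Chars.isspace = []) :
    pvLoop cs terms = if terms = [] then none else some terms := by
  rw [pvLoop.eq_def, h]

theorem pvLoop_op (cs : List Char) (c : Char) (rest : List Char)
    (h : cs.dropWhile PySem.Chars.isspace = c :: rest) (sg : Int)
    (hsg : (if c = '+' then some (1 : Int) else if c = '-' then some (-1 : Int) else none) = some sg)
    (terms : List (String × Int)) :
    pvLoop cs terms =
      match pvTerm rest sg with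
      | .err => none
      | .brk => if terms = [] then none else some terms
      | .ok rest' txt sgn => pvLoop rest' (terms ++ [(txt, sgn)]) := by
  rw [pvLoop.eq_def, h]; simp only [hsg]; cases pvTerm rest sg <;> rfl

theorem pvLoop_noop (cs : List Char) (c : Char) (rest : List Char)
    (h : cs.dropWhile PySem.Chars.isspace = c :: rest)
    (hsg : (if c = '+' then some (1 : Int) else if c = '-' then some (-1 : Int) else none) = none)
    (terms : List (String × Int)) :
    pvLoop cs terms = none := by
  rw [pvLoop.eq_def, h]; simp only [hsg]

theorem pvTerm_nil (cs : List Char) (sign : Int)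
    (h : cs.dropWhile PySem.Chars.isspace = []) : pvTerm cs sign = .brk := by
  simp only [pvTerm, h]

theorem pvTerm_cons (cs : List Char) (sign : Int) (c : Char) (rest : List Char)
    (h : cs.dropWhile PySem.Chars.isspace = c :: rest) :
    pvTerm cs sign =
      if c ≠ '(' then .err
      else
        match rest.dropWhile (fun d => d ≠ ')') with
        | [] => .err
        | _ :: rest' =>
          if (rest.takeWhile (fun d => d ≠ ')')).contains '(' then .err
          else if PySem.Chars.strip (rest.takeWhile (fun d => d ≠ ')')) = [] then .err
          else .ok rest' (String.ofList (PySem.Chars.strip (rest.takeWhile (fun d => d ≠ ')')))) sign := by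
  simp only [pvTerm, h]

theorem pvParseChunk_nil (chunk : List Char) (isFirst : Bool)
    (h : chunk.dropWhile (fun c => c ≠ '(') = []) : pvParseChunk chunk isFirst = none := by
  simp only [pvParseChunk, h]

theorem pvParseChunk_cons (chunk : List Char) (isFirst : Bool) (y : Char) (inner : List Char)
    (h : chunk.dropWhile (fun c => c ≠ '(') = y :: inner) :
    pvParseChunk chunk isFirst =
      match (if isFirst then (if chunk.takeWhile (fun c => c ≠ '(') ≠ [] then none else some (1 : Int))
             else
               (if PySem.Chars.strip (chunk.takeWhile (fun c => c ≠ '(')) = ['+'] then some (1 : Int)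
                else if PySem.Chars.strip (chunk.takeWhile (fun c => c ≠ '(')) = ['-'] then some (-1 : Int)
                else none)) with
      | none => none
      | some sign =>
        if inner.contains '(' then none
        else if PySem.Chars.strip inner = [] then none
        else some (String.ofList (PySem.Chars.strip inner), sign) := by
  simp only [pvParseChunk, h]

-- A consumes one chunk exactly as B parses it (continuation position, i.e. not the first chunk)

theorem pvChunk (u v : List Char) (hu : ')' ∉ u) (terms : List (String × Int)) :
    pvLoop (u ++ ')' :: v) terms =
      match pvParseChunk u false with
      | none => none
      | some t => pvLoop v (terms ++ [t]) := by
  have hsplit := List.takeWhile_append_dropWhile (p := PySem.Chars.isspace) (l := u)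
  have spw : ∀ c ∈ u.takeWhile PySem.Chars.isspace, PySem.Chars.isspace c = true :=
    fun c hc => List.mem_takeWhile_imp hc
  cases hu' : u.dropWhile PySem.Chars.isspace with
  | nil =>
    -- u is all whitespace: A reads the ')' as an operator and fails; B finds no '('
    have hall : ∀ c ∈ u, PySem.Chars.isspace c = true := by
      intro c hc
      rw [← hsplit, hu', List.append_nil] at hc
      exact spw c hc
    have hdwA : (u ++ ')' :: v).dropWhile PySem.Chars.isspace = ')' :: v := by
      rw [pv_dw_sp_append _ _ hall, pv_dw_cons_ns _ _ (by decide)]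
    have hnp : '(' ∉ u := pv_sp_not_mem hall (by decide)
    rw [pvLoop_noop _ _ _ hdwA (by decide), pvParseChunk_nil _ _ (pv_dw_np _ _ hnp)]
  | cons c r1 =>
    have hu_eq : u = u.takeWhile PySem.Chars.isspace ++ c :: r1 := by
      conv_lhs => rw [← hsplit, hu']
    have hcns : PySem.Chars.isspace c = false := by
      have h1 := List.head_dropWhile_not PySem.Chars.isspace (l := u) (by rw [hu']; simp)
      simpa [hu'] using h1
    have hdwA : (u ++ ')' :: v).dropWhile PySem.Chars.isspace = c :: (r1 ++ ')' :: v) := by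
      rw [hu_eq, List.append_assoc, List.cons_append, pv_dw_sp_append _ _ spw,
        pv_dw_cons_ns _ _ hcns]
    have hr1u : ∀ x ∈ r1, x ∈ u := by intro x hx; rw [hu_eq]; simp [hx]
    by_cases hop : c = '+' ∨ c = '-'
    · -- an operator: A parses the next term; B's chunk prefix strips to [c]
      have hcno : c ≠ '(' := by rcases hop with rfl | rfl <;> decide
      have hsg : (if c = '+' then some (1 : Int) else if c = '-' then some (-1 : Int) else none)
          = some (if c = '+' then (1 : Int) else -1) := by
        rcases hop with rfl | rfl <;> simp
      rw [pvLoop_op _ _ _ hdwA _ hsg]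
      have spw2 : ∀ x ∈ r1.takeWhile PySem.Chars.isspace, PySem.Chars.isspace x = true :=
        fun x hx => List.mem_takeWhile_imp hx
      have hsplit2 := List.takeWhile_append_dropWhile (p := PySem.Chars.isspace) (l := r1)
      cases hr2 : r1.dropWhile PySem.Chars.isspace with
      | nil =>
        -- nothing after the operator before the ')': A hits the ')' expecting '('
        have hall2 : ∀ x ∈ r1, PySem.Chars.isspace x = true := by
          intro x hx
          rw [← hsplit2, hr2, List.append_nil] at hx
          exact spw2 x hx
        have hdwT : (r1 ++ ')' :: v).dropWhile PySem.Chars.isspace = ')' :: v := by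
          rw [pv_dw_sp_append _ _ hall2, pv_dw_cons_ns _ _ (by decide)]
        have hnp : '(' ∉ u := by
          rw [hu_eq]
          intro h
          rcases List.mem_append.mp h with h | h
          · exact pv_sp_not_mem spw (by decide) h
          · rcases List.mem_cons.mp h with h | h
            · exact hcno h.symm
            · exact pv_sp_not_mem hall2 (by decide) h
        rw [pvTerm_cons _ _ _ _ hdwT, if_pos (by decide), pvParseChunk_nil _ _ (pv_dw_np _ _ hnp)]
      | cons d r3 =>
        have hr1_eq : r1 = r1.takeWhile PySem.Chars.isspace ++ d :: r3 := by
          conv_lhs => rw [← hsplit2, hr2]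
        have hdns : PySem.Chars.isspace d = false := by
          have h1 := List.head_dropWhile_not PySem.Chars.isspace (l := r1) (by rw [hr2]; simp)
          simpa [hr2] using h1
        have hdwT : (r1 ++ ')' :: v).dropWhile PySem.Chars.isspace = d :: (r3 ++ ')' :: v) := by
          rw [hr1_eq, List.append_assoc, List.cons_append, pv_dw_sp_append _ _ spw2,
            pv_dw_cons_ns _ _ hdns]
        rw [pvTerm_cons _ _ _ _ hdwT]
        by_cases hdp : d = '('
        · subst hdp
          -- well-formed chunk: whitespace, operator, whitespace, '(', body
          have hr3np : ')' ∉ r3 := fun h => hu (hr1u _ (by rw [hr1_eq]; simp [h]))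
          have hu_eq2 : u = (u.takeWhile PySem.Chars.isspace ++ c :: r1.takeWhile PySem.Chars.isspace) ++ '(' :: r3 := by
            conv_lhs => rw [hu_eq, hr1_eq]
            simp
          have hprenp : '(' ∉ u.takeWhile PySem.Chars.isspace ++ c :: r1.takeWhile PySem.Chars.isspace := by
            intro h
            rcases List.mem_append.mp h with h | h
            · exact pv_sp_not_mem spw (by decide) h
            · rcases List.mem_cons.mp h with h | h
              · exact hcno h.symm
              · exact pv_sp_not_mem spw2 (by decide) h
          have hdwB : u.dropWhile (fun x => x ≠ '(') = '(' :: r3 := by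
            conv_lhs => rw [hu_eq2]
            exact pv_dw_split _ _ _ hprenp
          have htwB : u.takeWhile (fun x => x ≠ '(') = u.takeWhile PySem.Chars.isspace ++ c :: r1.takeWhile PySem.Chars.isspace := by
            conv_lhs => rw [hu_eq2]
            exact pv_tw_split _ _ _ hprenp
          have hpre : PySem.Chars.strip (u.takeWhile (fun x => x ≠ '(')) = [c] := by
            rw [htwB, pv_strip_sp_append _ _ spw, pv_strip_cons_ns _ _ hcns, pv_rstrip_all_sp _ spw2]
          have htw3 : (r3 ++ ')' :: v).takeWhile (fun x => x ≠ ')') = r3 := pv_tw_split _ _ _ hr3np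
          have hdw3 : (r3 ++ ')' :: v).dropWhile (fun x => x ≠ ')') = ')' :: v := pv_dw_split _ _ _ hr3np
          rw [pvParseChunk_cons _ _ _ _ hdwB, htw3, hdw3, hpre, if_neg (by decide),
            if_neg Bool.false_ne_true]
          rcases hop with rfl | rfl
          · rw [if_pos rfl]
            by_cases hc1 : '(' ∈ r3
            · simp [hc1]
            · by_cases hc2 : PySem.Chars.strip r3 = []
              · simp [hc1, hc2]
              · simp [hc1, hc2]
          · rw [if_neg (by decide), if_pos rfl]
            by_cases hc1 : '(' ∈ r3
            · simp [hc1]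
            · by_cases hc2 : PySem.Chars.strip r3 = []
              · simp [hc1, hc2]
              · simp [hc1, hc2]
        · -- second non-space character is not '(': A fails; B's chunk prefix has two words
          rw [if_pos hdp]
          cases hq : u.dropWhile (fun x => x ≠ '(') with
          | nil => rw [pvParseChunk_nil _ _ hq]
          | cons y inner =>
            rw [pvParseChunk_cons _ _ _ _ hq, if_neg Bool.false_ne_true]
            have htwB : u.takeWhile (fun x => x ≠ '(') =
                u.takeWhile PySem.Chars.isspace ++ c :: (r1.takeWhile PySem.Chars.isspace ++ d :: r3.takeWhile (fun x => x ≠ '(')) := by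
              conv_lhs => rw [hu_eq, hr1_eq]
              rw [pv_tw_pass _ _ _ (pv_sp_not_mem spw (by decide)), pv_tw_cons_ne _ _ _ hcno,
                pv_tw_pass _ _ _ (pv_sp_not_mem spw2 (by decide)), pv_tw_cons_ne _ _ _ hdp]
            have hpre : PySem.Chars.strip (u.takeWhile (fun x => x ≠ '(')) =
                c :: PySem.Chars.rstrip (r1.takeWhile PySem.Chars.isspace ++ d :: r3.takeWhile (fun x => x ≠ '(')) := by
              rw [htwB, pv_strip_sp_append _ _ spw, pv_strip_cons_ns _ _ hcns]
            have hrne : PySem.Chars.rstrip (r1.takeWhile PySem.Chars.isspace ++ d :: r3.takeWhile (fun x => x ≠ '(')) ≠ [] :=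
              pv_rstrip_ne_nil _ d (by simp) hdns
            have hne1 : c :: PySem.Chars.rstrip (r1.takeWhile PySem.Chars.isspace ++ d :: r3.takeWhile (fun x => x ≠ '(')) ≠ ['+'] := by
              intro h; injection h with _ h2; exact hrne h2
            have hne2 : c :: PySem.Chars.rstrip (r1.takeWhile PySem.Chars.isspace ++ d :: r3.takeWhile (fun x => x ≠ '(')) ≠ ['-'] := by
              intro h; injection h with _ h2; exact hrne h2
            rw [hpre, if_neg hne1, if_neg hne2]
    · -- first non-space char is not an operator: A fails; B's prefix strips to [] or c :: …
      have hnone : (if c = '+' then some (1 : Int) else if c = '-' then some (-1 : Int) else none)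
          = none := by
        rcases not_or.mp hop with ⟨h1, h2⟩
        simp [h1, h2]
      rw [pvLoop_noop _ _ _ hdwA hnone]
      cases hq : u.dropWhile (fun x => x ≠ '(') with
      | nil => rw [pvParseChunk_nil _ _ hq]
      | cons y inner =>
        rw [pvParseChunk_cons _ _ _ _ hq, if_neg Bool.false_ne_true]
        by_cases hcp : c = '('
        · subst hcp
          have htwB : u.takeWhile (fun x => x ≠ '(') = u.takeWhile PySem.Chars.isspace := by
            conv_lhs => rw [hu_eq]
            rw [pv_tw_pass _ _ _ (pv_sp_not_mem spw (by decide)), pv_tw_cons_eq, List.append_nil]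
          have hpre : PySem.Chars.strip (u.takeWhile (fun x => x ≠ '(')) = [] := by
            rw [htwB]; exact pv_strip_all_sp _ spw
          rw [hpre, if_neg (by decide), if_neg (by decide)]
        · have htwB : u.takeWhile (fun x => x ≠ '(') =
              u.takeWhile PySem.Chars.isspace ++ c :: r1.takeWhile (fun x => x ≠ '(') := by
            conv_lhs => rw [hu_eq]
            rw [pv_tw_pass _ _ _ (pv_sp_not_mem spw (by decide)), pv_tw_cons_ne _ _ _ hcp]
          have hpre : PySem.Chars.strip (u.takeWhile (fun x => x ≠ '(')) =
              c :: PySem.Chars.rstrip (r1.takeWhile (fun x => x ≠ '(')) := by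
            rw [htwB, pv_strip_sp_append _ _ spw, pv_strip_cons_ns _ _ hcns]
          have hne1 : c :: PySem.Chars.rstrip (r1.takeWhile (fun x => x ≠ '(')) ≠ ['+'] := by
            intro h; injection h with h1 _; exact (not_or.mp hop).1 h1
          have hne2 : c :: PySem.Chars.rstrip (r1.takeWhile (fun x => x ≠ '(')) ≠ ['-'] := by
            intro h; injection h with h1 _; exact (not_or.mp hop).2 h1
          rw [hpre, if_neg hne1, if_neg hne2]

-- … and the very first chunk (no leading whitespace: the expression is stripped)

theorem pvFirst (u v : List Char) (hu : ')' ∉ u) (hhead : u.dropWhile PySem.Chars.isspace = u) :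
    (match pvTerm (u ++ ')' :: v) 1 with
     | .err => none
     | .brk => none
     | .ok rest txt sg => pvLoop rest [(txt, sg)]) =
      match pvParseChunk u true with
      | none => none
      | some t => pvLoop v [t] := by
  cases u with
  | nil =>
    have hdw : (')' :: v).dropWhile PySem.Chars.isspace = ')' :: v := pv_dw_cons_ns _ _ (by decide)
    rw [List.nil_append, pvTerm_cons _ _ _ _ hdw, if_pos (by decide),
      pvParseChunk_nil _ _ (by rfl)]
  | cons c u1 =>
    have hcns : PySem.Chars.isspace c = false := pv_ns_head c u1 hhead
    have hdwA : ((c :: u1) ++ ')' :: v).dropWhile PySem.Chars.isspace = c :: (u1 ++ ')' :: v) := by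
      rw [List.cons_append]; exact pv_dw_cons_ns _ _ (by simpa using hcns)
    rw [pvTerm_cons _ _ _ _ hdwA]
    by_cases hcp : c = '('
    · subst hcp
      have hu1 : ')' ∉ u1 := fun h => hu (List.mem_cons_of_mem _ h)
      have htw3 : (u1 ++ ')' :: v).takeWhile (fun x => x ≠ ')') = u1 := pv_tw_split _ _ _ hu1
      have hdw3 : (u1 ++ ')' :: v).dropWhile (fun x => x ≠ ')') = ')' :: v := pv_dw_split _ _ _ hu1
      have hdwB : ('(' :: u1).dropWhile (fun x => x ≠ '(') = '(' :: u1 := by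
        rw [List.dropWhile_cons, if_neg (by decide)]
      rw [if_neg (by decide), htw3, hdw3, pvParseChunk_cons _ _ _ _ hdwB,
        if_pos rfl, pv_tw_cons_eq, if_neg (by simp)]
      by_cases hc1 : '(' ∈ u1
      · simp [hc1]
      · by_cases hc2 : PySem.Chars.strip u1 = []
        · simp [hc1, hc2]
        · simp [hc1, hc2]
    · rw [if_pos hcp]
      cases hq : (c :: u1).dropWhile (fun x => x ≠ '(') with
      | nil => rw [pvParseChunk_nil _ _ hq]
      | cons y inner =>
        have hbne : (c :: u1).takeWhile (fun x => x ≠ '(') ≠ [] := by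
          rw [pv_tw_cons_ne _ _ _ hcp]; simp
        rw [pvParseChunk_cons _ _ _ _ hq, if_pos rfl, if_pos hbne]

-- A's loop after the first term fails iff the remaining chunks fail, with B's tail rule

theorem pvTail (v : List Char) (hin : ')' ∉ v) (terms : List (String × Int)) (hne : terms ≠ []) :
    pvLoop v terms =
      if (PySem.Chars.strip v = [] ∨ PySem.Chars.strip v = ['+'] ∨ PySem.Chars.strip v = ['-'])
      then some terms else none := by
  have hsplit := List.takeWhile_append_dropWhile (p := PySem.Chars.isspace) (l := v)
  have spw : ∀ c ∈ v.takeWhile PySem.Chars.isspace, PySem.Chars.isspace c = true :=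
    fun c hc => List.mem_takeWhile_imp hc
  cases hv' : v.dropWhile PySem.Chars.isspace with
  | nil =>
    have hall : ∀ c ∈ v, PySem.Chars.isspace c = true := by
      intro c hc
      rw [← hsplit, hv', List.append_nil] at hc
      exact spw c hc
    rw [pvLoop_nil _ _ hv', if_neg hne, if_pos (Or.inl (pv_strip_all_sp _ hall))]
  | cons c r1 =>
    have hv_eq : v = v.takeWhile PySem.Chars.isspace ++ c :: r1 := by
      conv_lhs => rw [← hsplit, hv']
    have hcns : PySem.Chars.isspace c = false := by
      have h1 := List.head_dropWhile_not PySem.Chars.isspace (l := v) (by rw [hv']; simp)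
      simpa [hv'] using h1
    have hstrip : PySem.Chars.strip v = c :: PySem.Chars.rstrip r1 := by
      conv_lhs => rw [hv_eq]
      rw [pv_strip_sp_append _ _ spw, pv_strip_cons_ns _ _ hcns]
    by_cases hop : c = '+' ∨ c = '-'
    · have hsg : (if c = '+' then some (1 : Int) else if c = '-' then some (-1 : Int) else none)
          = some (if c = '+' then (1 : Int) else -1) := by
        rcases hop with rfl | rfl <;> simp
      rw [pvLoop_op _ _ _ hv' _ hsg]
      cases hr2 : r1.dropWhile PySem.Chars.isspace with
      | nil =>
        have spw2 : ∀ x ∈ r1.takeWhile PySem.Chars.isspace, PySem.Chars.isspace x = true :=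
          fun x hx => List.mem_takeWhile_imp hx
        have hsplit2 := List.takeWhile_append_dropWhile (p := PySem.Chars.isspace) (l := r1)
        have hall2 : ∀ x ∈ r1, PySem.Chars.isspace x = true := by
          intro x hx
          rw [← hsplit2, hr2, List.append_nil] at hx
          exact spw2 x hx
        have h1 : PySem.Chars.strip v = [c] := by rw [hstrip, pv_rstrip_all_sp _ hall2]
        have htok : PySem.Chars.strip v = [] ∨ PySem.Chars.strip v = ['+'] ∨ PySem.Chars.strip v = ['-'] := by
          rcases hop with rfl | rfl
          · exact Or.inr (Or.inl h1)
          · exact Or.inr (Or.inr h1)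
        rw [pvTerm_nil _ _ hr2, if_neg hne, if_pos htok]
      | cons d r3 =>
        have hdns : PySem.Chars.isspace d = false := by
          have h1 := List.head_dropWhile_not PySem.Chars.isspace (l := r1) (by rw [hr2]; simp)
          simpa [hr2] using h1
        have hdr1 : d ∈ r1 := by
          have h1 : d ∈ r1.dropWhile PySem.Chars.isspace := by rw [hr2]; exact List.mem_cons_self ..
          exact (List.dropWhile_sublist _).subset h1
        have hrne : PySem.Chars.rstrip r1 ≠ [] := pv_rstrip_ne_nil _ d hdr1 hdns
        have hnotok : ¬ (PySem.Chars.strip v = [] ∨ PySem.Chars.strip v = ['+'] ∨ PySem.Chars.strip v = ['-']) := by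
          rw [hstrip]
          rintro (h | h | h)
          · exact List.cons_ne_nil _ _ h
          · injection h with _ h2; exact hrne h2
          · injection h with _ h2; exact hrne h2
        rw [pvTerm_cons _ _ _ _ hr2]
        have hr3np : ')' ∉ r3 := by
          intro h
          have h1 : (')' : Char) ∈ r1.dropWhile PySem.Chars.isspace := by
            rw [hr2]; exact List.mem_cons_of_mem _ h
          have h2 : (')' : Char) ∈ r1 := (List.dropWhile_sublist _).subset h1
          have h3 : (')' : Char) ∈ v.dropWhile PySem.Chars.isspace := by
            rw [hv']; exact List.mem_cons_of_mem _ h2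
          exact hin ((List.dropWhile_sublist _).subset h3)
        by_cases hdp : d = '('
        · subst hdp
          rw [if_neg (by decide), pv_dw_np _ _ hr3np, if_neg hnotok]
        · rw [if_pos hdp, if_neg hnotok]
    · have hnone : (if c = '+' then some (1 : Int) else if c = '-' then some (-1 : Int) else none)
          = none := by
        rcases not_or.mp hop with ⟨h1, h2⟩
        simp [h1, h2]
      have hnotok : ¬ (PySem.Chars.strip v = [] ∨ PySem.Chars.strip v = ['+'] ∨ PySem.Chars.strip v = ['-']) := by
        rw [hstrip]
        rintro (h | h | h)
        · exact List.cons_ne_nil _ _ h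
        · injection h with h1 _; exact (not_or.mp hop).1 h1
        · injection h with h1 _; exact (not_or.mp hop).2 h1
      rw [pvLoop_noop _ _ _ hv' hnone, if_neg hnotok]

-- A's loop from an operator position = B's chunk loop over the remaining chunks
-- (the tail rule checked up front by B), by strong induction on the suffix length

theorem pvCont (N : Nat) : ∀ (v : List Char), v.length < N → ∀ (terms : List (String × Int)),
    terms ≠ [] →
    pvLoop v terms =
      if (PySem.Chars.strip ((v.splitOn ')').getLastD []) = [] ∨
          PySem.Chars.strip ((v.splitOn ')').getLastD []) = ['+'] ∨
          PySem.Chars.strip ((v.splitOn ')').getLastD []) = ['-'])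
      then pvChunksLoop ((v.splitOn ')').dropLast) false terms
      else none := by
  induction N with
  | zero => intro v hv; omega
  | succ n IH =>
    intro v hv terms hne
    by_cases hin : ')' ∈ v
    · obtain ⟨u, v', huv, hu⟩ := pv_first_occ ')' v hin
      subst huv
      rw [pvChunk u v' hu terms, pv_splitOn_first u v' hu]
      have hlen : v'.length < n := by simp at hv; omega
      cases hpc : pvParseChunk u false with
      | none =>
        obtain ⟨s, ss, hss⟩ := List.exists_cons_of_ne_nil (pv_splitOn_ne_nil v')
        rw [hss]
        simp only [List.getLastD_eq_getLast?, List.getLast?_cons_cons, List.dropLast_cons₂]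
        split_ifs with h
        · simp [pvChunksLoop, hpc]
        · rfl
      | some t =>
        change pvLoop v' (terms ++ [t]) = _
        rw [IH v' hlen (terms ++ [t]) (by simp)]
        obtain ⟨s, ss, hss⟩ := List.exists_cons_of_ne_nil (pv_splitOn_ne_nil v')
        rw [hss]
        simp only [List.getLastD_eq_getLast?, List.getLast?_cons_cons, List.dropLast_cons₂]
        split_ifs with h
        · simp [pvChunksLoop, hpc]
        · rfl
    · rw [pvTail v hin terms hne, pv_splitOn_no v hin]
      simp only [List.getLastD_cons, List.getLastD_nil, List.dropLast_singleton]
      split_ifs with h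
      · rfl
      · rfl

-- ===== VERDICT (by name: the statement is the Claim_ definition above) =====
theorem parse_embedding_expression_py_spec : Claim_equal_parse_embedding_expression_py := by
  intro raw _
  unfold Spec_parse_embedding_expression_py parse_embedding_expression_py parse_embedding_expression_py_alt
  cases hg : pvContainsUnquotedParens raw.toList with
  | false => simp
  | true =>
    simp only [Bool.not_true, Bool.false_eq_true, if_false]
    by_cases hememp : PySem.Chars.strip raw.toList = []
    · simp [hememp]
    · rw [if_neg hememp, if_neg hememp]
      have hhead := pv_strip_fix raw.toList
      by_cases hin : ')' ∈ PySem.Chars.strip raw.toList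
      · obtain ⟨u, v, huv, hu⟩ := pv_first_occ ')' _ hin
        have h0 : (u ++ ')' :: v).dropWhile PySem.Chars.isspace = u ++ ')' :: v := by
          rw [← huv]; exact hhead
        have hheadu : u.dropWhile PySem.Chars.isspace = u := by
          cases u with
          | nil => rfl
          | cons c u1 =>
            exact pv_dw_cons_ns _ _ (pv_ns_head c (u1 ++ ')' :: v) (by simpa using h0))
        rw [huv, pvFirst u v hu hheadu, pv_splitOn_first u v hu]
        cases hpc : pvParseChunk u true with
        | none =>
          change (none : Option (List (String × Int))) = _
          obtain ⟨s, ss, hss⟩ := List.exists_cons_of_ne_nil (pv_splitOn_ne_nil v)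
          rw [hss, List.dropLast_cons₂, if_neg (show ¬(u :: (s :: ss).dropLast = []) by simp)]
          split_ifs with h
          · simp [pvChunksLoop, hpc]
          · rfl
        | some t =>
          change pvLoop v [t] = _
          rw [pvCont (v.length + 1) v (by omega) [t] (by simp)]
          obtain ⟨s, ss, hss⟩ := List.exists_cons_of_ne_nil (pv_splitOn_ne_nil v)
          rw [hss]
          simp only [List.getLastD_eq_getLast?, List.getLast?_cons_cons, List.dropLast_cons₂]
          rw [if_neg (show ¬(u :: (s :: ss).dropLast = []) by simp)]
          split_ifs with h
          · simp [pvChunksLoop, hpc]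
          · rfl
      · -- no ')' in the stripped expression: A never finds a closing ')', B has no body chunks
        obtain ⟨c, r, hcr⟩ := List.exists_cons_of_ne_nil hememp
        have hA : (match pvTerm (PySem.Chars.strip raw.toList) 1 with
            | PvTRes.err => (none : Option (List (String × Int)))
            | PvTRes.brk => none
            | PvTRes.ok rest txt sg => pvLoop rest [(txt, sg)]) = none := by
          rw [pvTerm_cons _ _ c r (by rw [hcr] at hhead ⊢; exact hhead)]
          by_cases hcp : c = '('
          · subst hcp
            have hrnp : ')' ∉ r := fun h => hin (by rw [hcr]; exact List.mem_cons_of_mem _ h)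
            rw [if_neg (by decide), pv_dw_np _ _ hrnp]
          · rw [if_pos hcp]
        rw [hA, pv_splitOn_no _ hin]
        simp only [List.getLastD_cons, List.getLastD_nil, List.dropLast_singleton]
        split_ifs with h
        · rfl
        · rfl
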